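-- pv_equiv track=rewrite | github.com/mpettersson/PythonReview | questions/list/find_sublists_with_sum.py | find_sublists_with_sum_naive_bf
-- ===== SOURCE A (Python) =====
-- def find_sublists_with_sum_naive_bf(l, t=0):
--     if l is not None:
--         result = []
--         for i in range(len(l)):         # O(n)
--             for j in range(i, len(l)):      # O(n)
--                 temp = l[i:j+1]                 # O(n)
--                 if sum(temp) == t:              # O(n)
--                     result.append((i, j))
-- #                   result.append(temp)         # Use this to return an actual list of sublists.
--         return result
-- ===== SOURCE B (Python) =====
-- def find_sublists_with_sum_naive_bf(l, t=0):
--     if l is not None: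
--         # staged: build prefix-sum table once, then one comprehension over (i, j)
--         p = [0]
--         for x in l:
--             p.append(p[-1] + x)
--         n = len(l)
--         return [(i, j) for i in range(n) for j in range(i, n) if p[j + 1] - p[i] == t]
-- ===== Notes on version B (the rewrite author's own statement) =====
-- stated objective: faster
-- what changed: B precomputes a prefix-sum table in one pass and then selects pairs (i, j) with p[j+1] - p[i] == t in a single comprehension, removing A's per-pair O(n) reslice-and-resum.
import Mathlib
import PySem

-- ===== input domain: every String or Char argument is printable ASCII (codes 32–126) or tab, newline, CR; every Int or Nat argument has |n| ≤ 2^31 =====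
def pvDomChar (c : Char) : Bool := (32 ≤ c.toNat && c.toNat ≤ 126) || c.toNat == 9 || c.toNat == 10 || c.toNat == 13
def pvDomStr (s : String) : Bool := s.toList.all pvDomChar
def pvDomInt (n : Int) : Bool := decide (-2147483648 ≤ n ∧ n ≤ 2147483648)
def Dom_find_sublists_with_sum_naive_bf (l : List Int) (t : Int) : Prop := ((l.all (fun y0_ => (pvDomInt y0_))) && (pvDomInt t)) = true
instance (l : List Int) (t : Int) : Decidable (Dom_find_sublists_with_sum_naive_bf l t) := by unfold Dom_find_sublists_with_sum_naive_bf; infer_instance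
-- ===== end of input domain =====

-- B builds a prefix-sum table in one pass and then selects the pairs (i, j) with
-- p[j+1] - p[i] == t in a single comprehension, instead of A's per-pair reslice-and-resum (O(n^2) vs O(n^3)).

-- ===== PORT A =====
def find_sublists_with_sum_naive_bf (l : List Int) (t : Int) : List (Int × Int) :=
  List.foldl (fun res i =>
    List.foldl (fun res j =>
      if (PySem.List.slice l (some i) (some (j + 1))).sum = t then res ++ [(i, j)] else res)
      res (PySem.List.pyRange i (PySem.List.len l)))
    [] (PySem.List.pyRange 0 (PySem.List.len l))

-- ===== PORT B =====
-- 'p.append(p[-1] + x)' : p is never empty, so p[-1] is its last element (getLastD 0 exact here)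
def pvPrefixTable (l : List Int) : List Int :=
  List.foldl (fun p x => p ++ [p.getLastD 0 + x]) [0] l

def find_sublists_with_sum_naive_bf_alt (l : List Int) (t : Int) : List (Int × Int) :=
  let p := pvPrefixTable l
  let n := PySem.List.len l
  (PySem.List.pyRange 0 n).flatMap (fun i =>
    (PySem.List.pyRange i n).filterMap (fun j =>
      if PySem.List.pyGetD p (j + 1) 0 - PySem.List.pyGetD p i 0 = t then some (i, j) else none))

-- ===== PRECONDITION & SPEC =====
def Spec_find_sublists_with_sum_naive_bf (l : List Int) (t : Int) (out : List (Int × Int)) : Prop := out = find_sublists_with_sum_naive_bf_alt l t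
instance (l : List Int) (t : Int) (out : List (Int × Int)) : Decidable (Spec_find_sublists_with_sum_naive_bf l t out) := by unfold Spec_find_sublists_with_sum_naive_bf; infer_instance

-- ===== CLAIM (what is proved, stated in full; the proofs are below) =====
def Claim_equal_find_sublists_with_sum_naive_bf : Prop := ∀ (l : List Int) (t : Int), Dom_find_sublists_with_sum_naive_bf l t → Spec_find_sublists_with_sum_naive_bf l t (find_sublists_with_sum_naive_bf l t)

-- ===== LEMMAS AND PROOFS =====

-- The prefix table is the scan of partial sums.
lemma pv_prefix_build (l : List Int) :
    ∀ (q : List Int) (a : Int), q ≠ [] → q.getLast? = some a →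
    List.foldl (fun p x => p ++ [p.getLastD 0 + x]) q l = q.dropLast ++ List.scanl (· + ·) a l := by
  induction l with
  | nil => intro q a hq ha; simp [List.dropLast_append_getLast? a ha]
  | cons x xs ih =>
    intro q a hq ha
    rw [List.foldl_cons, List.scanl_cons]
    have hlast : q.getLastD 0 = a := by
      rw [List.getLastD_eq_getLast?, ha]; rfl
    have hq' : q.dropLast ++ [a] = q := List.dropLast_append_getLast? a ha
    rw [hlast, ih (q ++ [a + x]) (a + x) (by simp) (by simp)]
    rw [← hq']
    simp

-- Entry k of the scan is a + sum of the first k elements.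
lemma pv_scanl_get (l : List Int) :
    ∀ (a : Int) (k : Nat), k ≤ l.length → (List.scanl (· + ·) a l)[k]? = some (a + (l.take k).sum) := by
  induction l with
  | nil =>
    intro a k hk
    have hk0 : k = 0 := by simpa using hk
    subst hk0; simp
  | cons x xs ih =>
    intro a k hk
    cases k with
    | zero => simp
    | succ m =>
      rw [List.scanl_cons, List.getElem?_cons_succ, List.take_succ_cons, List.sum_cons,
        ih (a + x) m (by simpa using hk)]
      ring_nf

-- Lookup in the prefix table, for 0 ≤ k ≤ len l.
lemma pv_prefix_getD (l : List Int) (k : Int) (h0 : 0 ≤ k) (hk : k ≤ (l.length : Int)) :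
    PySem.List.pyGetD (pvPrefixTable l) k 0 = (l.take k.toNat).sum := by
  have hb : pvPrefixTable l = List.scanl (· + ·) 0 l := by
    rw [pvPrefixTable, pv_prefix_build l [0] 0 (by simp) (by simp)]
    rfl
  have hlen : k.toNat < (List.scanl (· + ·) (0 : Int) l).length := by
    rw [List.length_scanl]; omega
  have := pv_scanl_get l 0 k.toNat (by omega)
  rw [hb, PySem.List.pyGetD_eq_getElem _ 0 h0 (by rw [List.length_scanl] at hlen ⊢; push_cast; omega)]
  rw [List.getElem?_eq_getElem hlen] at this
  simpa using Option.some.inj this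

-- A's resliced sum equals a difference of prefix-table entries.
lemma pv_slice_sum (l : List Int) (i j : Int) (h0 : 0 ≤ i) (hij : i ≤ j) (hj : j < (l.length : Int)) :
    (PySem.List.slice l (some i) (some (j + 1))).sum
      = PySem.List.pyGetD (pvPrefixTable l) (j + 1) 0 - PySem.List.pyGetD (pvPrefixTable l) i 0 := by
  rw [pv_prefix_getD l (j + 1) (by omega) (by omega), pv_prefix_getD l i h0 (by omega)]
  rw [PySem.List.slice_toNat l h0 (by omega)]
  have hsplit : (j + 1).toNat = i.toNat + ((j + 1).toNat - i.toNat) := by omega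
  have : l.take ((j + 1).toNat) = l.take i.toNat ++ (l.drop i.toNat).take ((j + 1).toNat - i.toNat) := by
    conv_lhs => rw [hsplit]
    rw [List.take_add]
  rw [this, List.sum_append]
  ring

-- A filterMap with an if-some-else-none body is a filter followed by a map.
lemma pv_filterMap_if {α β : Type} (c : α → Prop) [DecidablePred c] (f : α → β) (xs : List α) :
    xs.filterMap (fun x => if c x then some (f x) else none)
      = (xs.filter (fun x => decide (c x))).map f := by
  induction xs with
  | nil => rfl
  | cons x xs ih =>
    by_cases h : c x <;> simp [h, ih]

theorem find_sublists_with_sum_naive_bf_spec : Claim_equal_find_sublists_with_sum_naive_bf := by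
  intro l t _
  unfold Spec_find_sublists_with_sum_naive_bf
  unfold find_sublists_with_sum_naive_bf find_sublists_with_sum_naive_bf_alt
  simp only [PySem.List.len_eq]
  -- turn A's appending folds into filter/map and flatMap
  have hA : ∀ (res : List (Int × Int)) (i : Int),
      List.foldl (fun res j =>
        if (PySem.List.slice l (some i) (some (j + 1))).sum = t then res ++ [(i, j)] else res)
        res (PySem.List.pyRange i (l.length : Int))
      = res ++ ((PySem.List.pyRange i (l.length : Int)).filter
          (fun j => decide ((PySem.List.slice l (some i) (some (j + 1))).sum = t))).map (fun j => (i, j)) := by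
    intro res i
    exact PySem.List.foldl_append_ite _ _ _ _
  simp only [hA]
  rw [PySem.List.foldl_append_eq_flatMap]
  simp only [List.nil_append]
  apply List.flatMap_congr
  intro i hi
  rw [pv_filterMap_if]
  congr 1
  apply List.filter_congr
  intro j hj
  have hi' := PySem.List.mem_pyRange_one.mp hi
  have hj' := PySem.List.mem_pyRange_one.mp hj
  rw [pv_slice_sum l i j hi'.1 hj'.1 hj'.2]
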